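-- pv_equiv track=rewrite | github.com/akreminsky/28 | 2/main.py | odometer
-- ===== SOURCE A (Python) =====
-- from typing import List
--
-- def odometer(oksana: List[int]) -> int:
--     result = 0
--     for i in range(len(oksana)):
--         if i == 1:
--             result += oksana[1] * oksana[0]
--             continue
--         if i % 2 != 0:
--             if oksana[i] - oksana[i - 2] < 0:
--                 return 0
--             result += (oksana[i] - oksana[i - 2]) * oksana[i - 1]
--     return result
-- ===== SOURCE B (Python) =====
-- def odometer(oksana):
--     # Split the list into its even- and odd-position elements and apply
--     # summation by parts (Abel transform): the telescoping weighted sum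
--     #   oksana[1]*oksana[0] + sum (odds[k]-odds[k-1])*evens[k]
--     # equals  (last odd)*evens[m-1] + sum odds[k]*(evens[k]-evens[k+1]),
--     # valid (nonzero) exactly when the odd-position elements never decrease.
--     evens = oksana[0::2]
--     odds = oksana[1::2]
--     m = len(odds)
--     if m == 0:
--         return 0
--     if any(b1 > b2 for b1, b2 in zip(odds, odds[1:])):
--         return 0
--     return odds[m - 1] * evens[m - 1] + sum(
--         b * (a0 - a1) for b, a0, a1 in zip(odds, evens, evens[1:m])
--     )
-- ===== Notes on version B (the rewrite author's own statement) =====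
-- stated objective: alternative
-- what changed: B deinterleaves the list into even- and odd-position elements, checks validity as monotonicity of the odd-position sequence, and computes the result by the summation-by-parts (Abel) transform lastodd*evens[m-1] + sum odds[k]*(evens[k]-evens[k+1]) instead of A's fused index loop summing (oksana[i]-oksana[i-2])*oksana[i-1] with an early return.
import Mathlib
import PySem

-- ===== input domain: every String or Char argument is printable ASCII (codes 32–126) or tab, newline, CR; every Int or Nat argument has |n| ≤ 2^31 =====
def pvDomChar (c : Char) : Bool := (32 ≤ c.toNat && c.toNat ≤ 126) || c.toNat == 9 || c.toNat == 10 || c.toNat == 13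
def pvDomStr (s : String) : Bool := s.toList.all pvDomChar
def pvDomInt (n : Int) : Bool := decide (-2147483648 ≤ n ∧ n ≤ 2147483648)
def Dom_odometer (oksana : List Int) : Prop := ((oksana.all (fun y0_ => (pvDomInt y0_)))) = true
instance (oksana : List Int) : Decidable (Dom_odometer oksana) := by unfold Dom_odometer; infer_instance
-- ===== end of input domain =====

-- B deinterleaves the list into even-/odd-position elements, checks that the odd-position
-- sequence never decreases, and computes the summation-by-parts (Abel) transform of A's
-- telescoping weighted sum (objective: alternative algorithm, same O(n) cost).

-- ===== PORT A =====
-- A's for-loop over range(len(oksana)), transcribed as recursion over the index list;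
-- the early `return 0` is the constant-0 branch.  All indexing is in range, so getD is exact.
def odometer_loopA (oksana : List Int) : List Nat → Int → Int
  | [], result => result
  | i :: rest, result =>
    if i = 1 then
      odometer_loopA oksana rest (result + oksana.getD 1 0 * oksana.getD 0 0)
    else if i % 2 ≠ 0 then
      if oksana.getD i 0 - oksana.getD (i - 2) 0 < 0 then 0
      else odometer_loopA oksana rest
        (result + (oksana.getD i 0 - oksana.getD (i - 2) 0) * oksana.getD (i - 1) 0)
    else
      odometer_loopA oksana rest result

def odometer (oksana : List Int) : Int :=
  odometer_loopA oksana (List.range oksana.length) 0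

-- ===== PORT B =====
-- xs[0::2]: every other element of xs, starting with the first (hand port of that slice)
def everyOther : List Int → List Int
  | [] => []
  | [x] => [x]
  | x :: _ :: r => x :: everyOther r

def odometer_alt (oksana : List Int) : Int :=
  let evens := everyOther oksana                 -- oksana[0::2]
  let odds := everyOther (oksana.drop 1)         -- oksana[1::2]
  let m := odds.length
  if m = 0 then 0
  else if (odds.zip (odds.drop 1)).any (fun p => p.1 > p.2) then 0
  else
    odds.getD (m - 1) 0 * evens.getD (m - 1) 0
      + ((odds.zip (evens.zip ((evens.drop 1).take (m - 1)))).map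
          (fun p => p.1 * (p.2.1 - p.2.2))).sum

-- ===== PRECONDITION & SPEC =====
def Spec_odometer (oksana : List Int) (out : Int) : Prop := out = odometer_alt oksana
instance (oksana : List Int) (out : Int) : Decidable (Spec_odometer oksana out) := by unfold Spec_odometer; infer_instance

-- ===== CLAIM (what is proved, stated in full; the proofs are below) =====
def Claim_equal_odometer : Prop := ∀ (oksana : List Int), Dom_odometer oksana → Spec_odometer oksana (odometer oksana)

-- ===== LEMMAS AND PROOFS =====

-- proof-only abbreviations for A's per-index behaviour
def pvBad (ok : List Int) (i : Nat) : Bool :=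
  decide (i ≠ 1 ∧ i % 2 = 1 ∧ ok.getD i 0 - ok.getD (i - 2) 0 < 0)

def pvTerm (ok : List Int) (i : Nat) : Int :=
  if i = 1 then ok.getD 1 0 * ok.getD 0 0
  else if i % 2 = 1 then (ok.getD i 0 - ok.getD (i - 2) 0) * ok.getD (i - 1) 0
  else 0

-- characterisation of A's loop
theorem loopA_char (ok : List Int) (l : List Nat) (r : Int) :
    odometer_loopA ok l r =
      if l.any (pvBad ok) then 0 else r + (l.map (pvTerm ok)).sum := by
  induction l generalizing r with
  | nil => simp [odometer_loopA]
  | cons i rest ih =>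
    by_cases h1 : i = 1
    · subst h1
      simp [odometer_loopA, ih, pvBad, pvTerm, add_assoc]
    · by_cases h2 : i % 2 = 1
      · by_cases h3 : ok.getD i 0 - ok.getD (i - 2) 0 < 0
        all_goals rw [sub_neg] at h3
        all_goals simp only [List.getD] at h3
        · simp [odometer_loopA, h1, h2, h3, pvBad]
        · simp [odometer_loopA, h1, h2, h3, ih, pvBad, pvTerm, add_assoc]
      · have h2' : i % 2 = 0 := by omega
        simp [odometer_loopA, h1, h2', ih, pvBad, pvTerm]

-- proof-only: the ascending odd indices i, i+2, … below n
def step2 (i n : Nat) : List Nat :=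
  if i < n then i :: step2 (i + 2) n else []
termination_by n - i

theorem step2_snoc (i n : Nat) :
    step2 i (n + 1) = step2 i n ++ (if i ≤ n ∧ (n - i) % 2 = 0 then [n] else []) := by
  by_cases h : i < n + 1
  · rcases Nat.lt_or_ge i n with hlt | hge
    · have ih := step2_snoc (i + 2) n
      conv_lhs => rw [step2]
      rw [if_pos h, ih]
      conv_rhs => rw [step2]
      rw [if_pos hlt]
      by_cases hc : i + 2 ≤ n ∧ (n - (i + 2)) % 2 = 0
      · simp [hc, (by omega : i ≤ n ∧ (n - i) % 2 = 0)]
      · have hnc : ¬ (i ≤ n ∧ (n - i) % 2 = 0) := by omega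
        simp [hc, hnc]
    · have hin : i = n := by omega
      subst hin
      conv_lhs => rw [step2]
      rw [if_pos h]
      conv_lhs => rw [step2]
      rw [if_neg (by omega)]
      conv_rhs => rw [step2]
      rw [if_neg (by omega)]
      simp
  · have hn : ¬ i < n := by omega
    conv_lhs => rw [step2]
    rw [if_neg h]
    conv_rhs => rw [step2]
    rw [if_neg hn]
    have hnc : ¬ (i ≤ n ∧ (n - i) % 2 = 0) := by omega
    simp [hnc]
termination_by n - i

-- the guard indices are exactly A's bad indices
theorem any_bridge (ok : List Int) (n : Nat) :
    (List.range n).any (pvBad ok) =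
      (step2 3 n).any (fun i => ok.getD i 0 - ok.getD (i - 2) 0 < 0) := by
  induction n with
  | zero => rw [step2]; simp
  | succ m ih =>
    rw [List.range_succ, step2_snoc]
    by_cases hc : 3 ≤ m ∧ (m - 3) % 2 = 0
    · have hodd : m % 2 = 1 := by omega
      have hne : m ≠ 1 := by omega
      simp [hc, ih, pvBad, hne, hodd]
    · have : pvBad ok m = false := by
        simp only [pvBad, decide_eq_false_iff_not]
        rintro ⟨h1, h2, -⟩; omega
      simp [hc, ih, this]

theorem sum_bridge (ok : List Int) (n : Nat) :
    ((List.range n).map (pvTerm ok)).sum =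
      (if 2 ≤ n then ok.getD 1 0 * ok.getD 0 0 else 0)
        + ((step2 3 n).map (fun i =>
            (ok.getD i 0 - ok.getD (i - 2) 0) * ok.getD (i - 1) 0)).sum := by
  induction n with
  | zero => rw [step2]; simp
  | succ m ih =>
    rw [List.range_succ, step2_snoc]
    by_cases hc : 3 ≤ m ∧ (m - 3) % 2 = 0
    · have hodd : m % 2 = 1 := by omega
      have hne : m ≠ 1 := by omega
      simp [hc, ih, pvTerm, hne, hodd, (by omega : 2 ≤ m), (by omega : 2 ≤ m + 1)]
      ring
    · by_cases hm1 : m = 1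
      · subst hm1
        have hnil : step2 3 1 = [] := by rw [step2]; norm_num
        simp [pvTerm, hnil]
      · have ht : pvTerm ok m = 0 := by
          simp only [pvTerm, if_neg hm1]
          have : ¬ m % 2 = 1 := by omega
          simp [this]
        have h2 : 2 ≤ m + 1 ↔ 2 ≤ m := by omega
        simp [hc, ih, ht, h2]

-- common middle: pairwise walk with threaded previous odd value
def pvGo : List Int → Int → Option Int
  | a :: b :: rest, prev =>
    if b - prev < 0 then none
    else match pvGo rest b with
      | none => none
      | some t => some ((b - prev) * a + t)
  | _, _ => some 0

def pvGoV : List Int → Int → Int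
  | a :: b :: rest, prev => (b - prev) * a + pvGoV rest b
  | _, _ => 0

theorem pvGo_none_or (t : List Int) (prev : Int) :
    pvGo t prev = none ∨ pvGo t prev = some (pvGoV t prev) := by
  match t with
  | [] => right; rfl
  | [a] => right; rfl
  | a :: b :: rest =>
    by_cases h : b - prev < 0
    · left; simp [pvGo, h]
    · rcases pvGo_none_or rest b with hn | hs
      · left; simp [pvGo, h, hn]
      · right; simp [pvGo, pvGoV, h, hs]

theorem step2_shift (i n : Nat) :
    step2 (i + 2) (n + 2) = (step2 i n).map (· + 2) := by
  by_cases h : i < n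
  · conv_lhs => rw [step2]
    conv_rhs => rw [step2]
    rw [if_pos (by omega), if_pos h]
    simpa using step2_shift (i + 2) n
  · conv_lhs => rw [step2]
    conv_rhs => rw [step2]
    rw [if_neg (by omega), if_neg h]
    simp
termination_by n - i

theorem step2_mem_ge (i n j : Nat) (hj : j ∈ step2 i n) : i ≤ j := by
  by_cases h : i < n
  · rw [step2, if_pos h] at hj
    rcases List.mem_cons.mp hj with rfl | hj'
    · omega
    · have := step2_mem_ge (i + 2) n j hj'
      omega
  · rw [step2, if_neg h] at hj
    simp at hj
termination_by n - i

theorem any_congr_mem {α : Type} (l : List α) {p q : α → Bool}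
    (h : ∀ a ∈ l, p a = q a) : l.any p = l.any q := by
  induction l with
  | nil => rfl
  | cons x xs ih =>
    simp only [List.any_cons]
    rw [h x (by simp), ih (fun a ha => h a (by simp [ha]))]

-- A's guard over (o0::o1::t) is pvGo going none
theorem guardA_eq (t : List Int) (o0 o1 : Int) :
    ((step2 3 (t.length + 2)).any
        (fun i => (o0 :: o1 :: t).getD i 0 - (o0 :: o1 :: t).getD (i - 2) 0 < 0))
      = (pvGo t o1).isNone := by
  match t with
  | [] => rw [step2]; simp [pvGo]
  | [c] => rw [step2]; simp [pvGo]
  | c :: d :: r =>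
    have hcons : step2 3 (r.length + 4) = 3 :: step2 5 (r.length + 4) := by
      rw [step2]; rw [if_pos (by omega)]
    have hshift : step2 5 (r.length + 4) = (step2 3 (r.length + 2)).map (· + 2) := by
      have := step2_shift 3 (r.length + 2)
      simpa using this
    simp only [List.length_cons]
    have h24 : r.length + 1 + 1 + 2 = r.length + 4 := by omega
    rw [h24, hcons, hshift, List.any_cons, List.any_map]
    have hmem : ∀ j ∈ step2 3 (r.length + 2),
        (((fun i => decide ((o0 :: o1 :: c :: d :: r).getD i 0
              - (o0 :: o1 :: c :: d :: r).getD (i - 2) 0 < 0)) ∘ (· + 2)) j)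
          = (fun i => decide ((c :: d :: r).getD i 0 - (c :: d :: r).getD (i - 2) 0 < 0)) j := by
      intro j hj
      have h3 : 3 ≤ j := step2_mem_ge 3 _ j hj
      have e1 : (o0 :: o1 :: c :: d :: r).getD (j + 2) 0 = (c :: d :: r).getD j 0 := by
        simp
      have e2 : (o0 :: o1 :: c :: d :: r).getD (j + 2 - 2) 0 = (c :: d :: r).getD (j - 2) 0 := by
        have hj2 : j + 2 - 2 = (j - 2) + 2 := by omega
        rw [hj2]; simp
      simp only [Function.comp]
      rw [e1, e2]
    rw [any_congr_mem _ hmem]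
    rw [guardA_eq r c d]
    have hhead : ((o0 :: o1 :: c :: d :: r).getD 3 0
        - (o0 :: o1 :: c :: d :: r).getD (3 - 2) 0) = d - o1 := by
      simp [List.getD]
    by_cases h : d - o1 < 0
    · simp [pvGo, h, List.getD]
    · rcases pvGo_none_or r d with hn | hs
      · simp [pvGo, h, hn, List.getD]
      · rw [hs]; simp [pvGo, h, List.getD, hs]
  termination_by t.length

-- A's weighted sum over (o0::o1::t) is pvGoV
theorem sumA_eq (t : List Int) (o0 o1 : Int) :
    ((step2 3 (t.length + 2)).map
        (fun i => ((o0 :: o1 :: t).getD i 0 - (o0 :: o1 :: t).getD (i - 2) 0)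
          * (o0 :: o1 :: t).getD (i - 1) 0)).sum
      = pvGoV t o1 := by
  match t with
  | [] => rw [step2]; simp [pvGoV]
  | [c] => rw [step2]; simp [pvGoV]
  | c :: d :: r =>
    have hcons : step2 3 (r.length + 4) = 3 :: step2 5 (r.length + 4) := by
      rw [step2]; rw [if_pos (by omega)]
    have hshift : step2 5 (r.length + 4) = (step2 3 (r.length + 2)).map (· + 2) := by
      have := step2_shift 3 (r.length + 2)
      simpa using this
    simp only [List.length_cons]
    have h24 : r.length + 1 + 1 + 2 = r.length + 4 := by omega
    rw [h24, hcons, hshift, List.map_cons, List.map_map]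
    have hmem : ∀ j ∈ step2 3 (r.length + 2),
        (((fun i => ((o0 :: o1 :: c :: d :: r).getD i 0
              - (o0 :: o1 :: c :: d :: r).getD (i - 2) 0)
            * (o0 :: o1 :: c :: d :: r).getD (i - 1) 0) ∘ (· + 2)) j)
          = (fun i => ((c :: d :: r).getD i 0 - (c :: d :: r).getD (i - 2) 0)
            * (c :: d :: r).getD (i - 1) 0) j := by
      intro j hj
      have h3 : 3 ≤ j := step2_mem_ge 3 _ j hj
      have e1 : (o0 :: o1 :: c :: d :: r).getD (j + 2) 0 = (c :: d :: r).getD j 0 := by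
        simp
      have e2 : (o0 :: o1 :: c :: d :: r).getD (j + 2 - 2) 0 = (c :: d :: r).getD (j - 2) 0 := by
        have hj2 : j + 2 - 2 = (j - 2) + 2 := by omega
        rw [hj2]; simp
      have e3 : (o0 :: o1 :: c :: d :: r).getD (j + 2 - 1) 0 = (c :: d :: r).getD (j - 1) 0 := by
        have hj1 : j + 2 - 1 = (j - 1) + 2 := by omega
        rw [hj1]; simp
      simp only [Function.comp]
      rw [e1, e2, e3]
    rw [List.map_congr_left hmem]
    rw [List.sum_cons, sumA_eq r c d]
    have hhead : ((o0 :: o1 :: c :: d :: r).getD 3 0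
        - (o0 :: o1 :: c :: d :: r).getD (3 - 2) 0)
        * (o0 :: o1 :: c :: d :: r).getD (3 - 1) 0 = (d - o1) * c := by
      simp [List.getD]
    rw [hhead]
    simp only [pvGoV]
  termination_by t.length

-- spine of every-other extraction
theorem eo_cons (x : Int) (l : List Int) :
    everyOther (x :: l) = x :: everyOther (l.drop 1) := by
  cases l <;> rfl

-- B's monotonicity check over the odd positions is pvGo going none
theorem guardB_eq (t : List Int) (o1 : Int) :
    ((everyOther (o1 :: t)).zip ((everyOther (o1 :: t)).drop 1)).any
        (fun p => p.1 > p.2)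
      = (pvGo t o1).isNone := by
  match t with
  | [] => simp [everyOther, pvGo]
  | [c] => simp [everyOther, pvGo]
  | c :: d :: r =>
    have h1 : everyOther (o1 :: c :: d :: r) = o1 :: everyOther (d :: r) := rfl
    have h2 : everyOther (d :: r) = d :: everyOther (r.drop 1) := eo_cons d r
    rw [h1, h2]
    simp only [List.zip_cons_cons, List.drop_succ_cons, List.drop_zero, List.any_cons]
    have ih := guardB_eq r d
    rw [h2] at ih
    simp only [List.drop_succ_cons, List.drop_zero] at ih
    rw [ih]
    have hgt : (decide (o1 > d)) = decide (d - o1 < 0) := by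
      simp only [decide_eq_decide]; omega
    by_cases h : d - o1 < 0
    · simp [pvGo, h, hgt]
    · rcases pvGo_none_or r d with hn | hs
      · simp [pvGo, h, hgt, hn]
      · rw [hs]; simp [pvGo, h, hgt, hs]
  termination_by t.length

-- B's Abel-transformed sum equals the head term plus pvGoV
theorem sumB_eq (t : List Int) (o0 o1 : Int) :
    (everyOther (o1 :: t)).getD ((everyOther (o1 :: t)).length - 1) 0
        * (everyOther (o0 :: o1 :: t)).getD ((everyOther (o1 :: t)).length - 1) 0
      + (((everyOther (o1 :: t)).zip ((everyOther (o0 :: o1 :: t)).zip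
            (((everyOther (o0 :: o1 :: t)).drop 1).take ((everyOther (o1 :: t)).length - 1)))).map
          (fun p => p.1 * (p.2.1 - p.2.2))).sum
      = o1 * o0 + pvGoV t o1 := by
  match t with
  | [] => simp [everyOther, pvGoV]
  | [c] => simp [everyOther, pvGoV]
  | c :: d :: r =>
    have ih := sumB_eq r c d
    have hodds : everyOther (o1 :: c :: d :: r) = o1 :: everyOther (d :: r) := rfl
    have hevens : everyOther (o0 :: o1 :: c :: d :: r) = o0 :: everyOther (c :: d :: r) := rfl
    rw [hodds, hevens]
    set O := everyOther (d :: r) with hOdef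
    set E := everyOther (c :: d :: r) with hEdef
    have hOne : O = d :: everyOther (r.drop 1) := eo_cons d r
    have hEne : E = c :: everyOther r := rfl
    have hOn : 1 ≤ O.length := by rw [hOne]; simp
    have hm : (o1 :: O).length - 1 = O.length := by simp
    rw [hm]
    have g1 : (o1 :: O).getD O.length 0 = O.getD (O.length - 1) 0 := by
      have hx : O.length = (O.length - 1) + 1 := by omega
      rw [hx]; simp
    have g2 : (o0 :: E).getD O.length 0 = E.getD (O.length - 1) 0 := by
      have hx : O.length = (O.length - 1) + 1 := by omega
      rw [hx]; simp
    rw [g1, g2]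
    have hdrop : (o0 :: E).drop 1 = E := by simp
    rw [hdrop]
    have htake : E.take O.length = c :: (everyOther r).take (O.length - 1) := by
      rw [hEne]
      have hx : O.length = (O.length - 1) + 1 := by omega
      rw [hx]; simp
    rw [htake]
    simp only [List.zip_cons_cons, List.map_cons, List.sum_cons]
    have ihdrop : E.drop 1 = everyOther r := by rw [hEne]; simp
    rw [ihdrop] at ih
    have hgv : pvGoV (c :: d :: r) o1 = (d - o1) * c + pvGoV r d := rfl
    rw [hgv]
    linear_combination ih
  termination_by t.length

-- each port computed through the common pairwise walk
theorem odometer_go (t : List Int) (o0 o1 : Int) :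
    odometer (o0 :: o1 :: t)
      = match pvGo t o1 with | none => 0 | some s => o1 * o0 + s := by
  unfold odometer
  rw [loopA_char, any_bridge, sum_bridge]
  have hlen : (o0 :: o1 :: t).length = t.length + 2 := by simp
  rw [hlen]
  rw [guardA_eq, sumA_eq]
  have hg : (o0 :: o1 :: t).getD 1 0 * (o0 :: o1 :: t).getD 0 0 = o1 * o0 := by
    simp [List.getD]
  rcases pvGo_none_or t o1 with hn | hs
  · rw [hn]
    simp
  · rw [hs]
    simp [List.getD]

theorem odometer_alt_go (t : List Int) (o0 o1 : Int) :
    odometer_alt (o0 :: o1 :: t)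
      = match pvGo t o1 with | none => 0 | some s => o1 * o0 + s := by
  unfold odometer_alt
  simp only [List.drop_succ_cons, List.drop_zero]
  have hodds : everyOther (o1 :: t) = o1 :: everyOther (t.drop 1) := eo_cons o1 t
  have hm : (everyOther (o1 :: t)).length ≠ 0 := by rw [hodds]; simp
  rw [if_neg hm]
  rw [guardB_eq]
  rcases pvGo_none_or t o1 with hn | hs
  · rw [hn]
    simp
  · rw [hs]
    simp only [Option.isNone_some, Bool.false_eq_true, if_false]
    have hsum := sumB_eq t o0 o1
    rw [hsum]

-- ===== VERDICT (by name: the statement is the Claim_ definition above) =====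
theorem odometer_spec : Claim_equal_odometer := by
  intro oksana _
  unfold Spec_odometer
  match oksana with
  | [] => rfl
  | [x] =>
    show odometer_loopA [x] (List.range 1) 0 = odometer_alt [x]
    simp [List.range_succ, odometer_loopA, odometer_alt, everyOther]
  | o0 :: o1 :: t =>
    rw [odometer_go, odometer_alt_go]
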